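-- pv_equiv track=rewrite | github.com/ys815h/Algorithm | 프로그래머스/unrated/135808. 과일 장수/과일 장수.py | solution
-- ===== SOURCE A (Python) =====
-- def solution(k, m, score):
--     answer = 0
--     box = []
--     st = []
--     score.sort(reverse = True)
--     for i in score:
--         if len(st) == m:
--             box.append(st)
--             st = []
--         st.append(i)
--     if len(st) == m:
--         box.append(st)
--     for j in box:
--         answer += min(j)*m
--     return answer
-- ===== SOURCE B (Python) =====
-- def solution(k, m, score):
--     score.sort(reverse=True)
--     return m * sum(score[i] for i in range(m - 1, len(score), m))
-- ===== Notes on version B (the rewrite author's own statement) =====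
-- stated objective: simpler
-- what changed: Instead of grouping the sorted scores into explicit box sublists and scanning each box for its minimum, B sums the sorted list directly at the box-boundary indices m-1, 2m-1, ... (the minimum of each complete box) and multiplies by m once.
import Mathlib
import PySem

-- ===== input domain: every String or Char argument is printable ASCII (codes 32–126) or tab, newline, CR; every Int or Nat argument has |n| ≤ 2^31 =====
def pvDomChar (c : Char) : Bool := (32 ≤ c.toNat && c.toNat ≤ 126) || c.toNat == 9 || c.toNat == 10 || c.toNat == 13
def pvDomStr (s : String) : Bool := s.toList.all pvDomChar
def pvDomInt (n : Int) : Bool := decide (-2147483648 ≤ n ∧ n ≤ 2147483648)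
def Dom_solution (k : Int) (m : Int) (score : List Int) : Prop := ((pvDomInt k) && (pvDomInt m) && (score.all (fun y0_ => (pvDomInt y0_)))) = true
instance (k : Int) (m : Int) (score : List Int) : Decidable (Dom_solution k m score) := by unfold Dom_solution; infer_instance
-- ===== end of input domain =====

-- B sums the sorted-descending list at box-boundary indices m-1, 2m-1, ... (each complete box's
-- minimum) instead of building box sublists and scanning each for min; same return value.
-- Both A and B sort `score` in place (same mutation); the equivalence proved is about the return value.


-- ===== PORT A =====
-- loop body of A's grouping pass: flush st into box when it holds m scores, then append i
def pvStep (m : Int) (acc : List (List Int) × List Int) (i : Int) : List (List Int) × List Int :=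
  if (acc.2.length : Int) = m then (acc.1 ++ [acc.2], [i]) else (acc.1, acc.2 ++ [i])

def solution (k : Int) (m : Int) (score : List Int) : Int :=
  -- score.sort(reverse=True)
  let s := PySem.List.sorted score (fun x => x) true
  -- for i in score: group into st / box
  let p := s.foldl (pvStep m) ([], [])
  -- trailing complete box
  let box := if (p.2.length : Int) = m then p.1 ++ [p.2] else p.1
  -- for j in box: answer += min(j)*m    (min([]) never occurs under Pre_solution)
  box.foldl (fun answer j => answer + (PySem.List.min? j (fun x => x)).getD 0 * m) 0

-- ===== PORT B =====
def solution_alt (k : Int) (m : Int) (score : List Int) : Int :=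
  let s := PySem.List.sorted score (fun x => x) true
  m * (PySem.List.pyRange (m - 1) (s.length : Int) m).foldl
        (fun acc i => acc + PySem.List.pyGetD s i 0) 0

-- ===== PRECONDITION & SPEC =====
-- m = 0 is excluded: there Python A raises ValueError (min of an empty box) and Python B raises
-- ValueError (range step 0); both ports would otherwise return a defaulted value.
def Pre_solution (k : Int) (m : Int) (score : List Int) : Prop := m ≠ 0
instance (k : Int) (m : Int) (score : List Int) : Decidable (Pre_solution k m score) := by unfold Pre_solution; infer_instance
def pvWitness_solution : Int × Int × List Int := (4, 3, [1, 2, 3, 1, 2, 3, 1])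
def Spec_solution (k : Int) (m : Int) (score : List Int) (out : Int) : Prop := out = solution_alt k m score
instance (k : Int) (m : Int) (score : List Int) (out : Int) : Decidable (Spec_solution k m score out) := by unfold Spec_solution; infer_instance

-- ===== CLAIM (what is proved, stated in full; the proofs are below) =====
def Claim_equal_solution : Prop := ∀ (k : Int) (m : Int) (score : List Int), Dom_solution k m score → Pre_solution k m score → Spec_solution k m score (solution k m score)

-- ===== LEMMAS AND PROOFS =====

-- the complete m-chunks of a list, front to back
def pvChunks (m : Nat) (l : List Int) : List (List Int) :=
  if h : 0 < m ∧ m ≤ l.length then l.take m :: pvChunks m (l.drop m) else []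
termination_by l.length
decreasing_by simp; omega

theorem pvChunks_nil (m : Nat) : pvChunks m [] = [] := by
  rw [pvChunks]; simp only [List.length_nil]; rw [dif_neg (by omega)]

-- A's grouping fold produces exactly the complete m-chunks
theorem pvFold_inv (m : Int) (hm : 0 < m) :
    ∀ (s : List Int) (box : List (List Int)) (st : List Int),
      0 < st.length → (st.length : Int) ≤ m →
      (let r := s.foldl (pvStep m) (box, st)
       if (r.2.length : Int) = m then r.1 ++ [r.2] else r.1)
        = box ++ pvChunks m.toNat (st ++ s) := by
  intro s
  induction s with
  | nil =>
    intro box st h0 h1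
    simp only [List.foldl_nil, List.append_nil]
    by_cases h : (st.length : Int) = m
    · rw [if_pos h, pvChunks]
      have hlen : m.toNat = st.length := by omega
      rw [dif_pos (by omega)]
      simp [hlen, pvChunks_nil]
    · rw [if_neg h, pvChunks, dif_neg (by omega)]
      simp
  | cons x rest ih =>
    intro box st h0 h1
    simp only [List.foldl_cons]
    by_cases h : (st.length : Int) = m
    · rw [show pvStep m (box, st) x = (box ++ [st], [x]) by simp [pvStep, h]]
      have := ih (box ++ [st]) [x] (by simp) (by simpa using hm)
      simp only at this
      rw [this, List.append_assoc]
      congr 1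
      have hcond : 0 < m.toNat ∧ m.toNat ≤ (st ++ x :: rest).length := ⟨by omega, by simp; omega⟩
      conv_rhs => rw [pvChunks, dif_pos hcond]
      have htake : (st ++ x :: rest).take m.toNat = st := by
        rw [List.take_append_of_le_length (by omega)]
        simp; omega
      have hdrop : (st ++ x :: rest).drop m.toNat = x :: rest := by
        rw [List.drop_append_of_le_length (by omega)]
        have : st.drop m.toNat = [] := by simp; omega
        simp [this]
      rw [htake, hdrop]
      simp
    · rw [show pvStep m (box, st) x = (box, st ++ [x]) by simp [pvStep, h]]
      have := ih box (st ++ [x]) (by simp) (by simp; omega)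
      simp only at this
      rw [this, List.append_assoc]
      simp
  
-- the first-extremal min of a descending-sorted nonempty list is its last element
theorem pvMin_desc (l : List Int) (h : l ≠ []) (hp : l.Pairwise (fun a b => b ≤ a)) :
    (PySem.List.min? l (fun x => x)).getD 0 = l.getLast h := by
  cases hmin : PySem.List.min? l (fun x => x) with
  | none => exact absurd ((PySem.List.min?_eq_none_iff l _).mp hmin) h
  | some v =>
    have hv := PySem.List.min?_mem hmin
    have hmin' := PySem.List.min?_isMin hmin
    have hlast : l.getLast h ∈ l := List.getLast_mem h
    have h1 : v ≤ l.getLast h := hmin' _ hlast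
    -- every element of l is ≥ the last one
    have h2 : ∀ y ∈ l, l.getLast h ≤ y := by
      intro y hy
      obtain ⟨i, hi, rfl⟩ := List.mem_iff_getElem.mp hy
      rw [List.getLast_eq_getElem]
      rcases Nat.lt_or_ge i (l.length - 1) with hlt | hge
      · exact List.pairwise_iff_getElem.mp hp i (l.length - 1) hi (by omega) hlt
      · have : i = l.length - 1 := by omega
        simp [this]
    have h3 := h2 v hv
    simp; omega

-- range with positive step: emptiness, unfolding, translation
theorem pvRange_empty (a b st : Int) (hst : 0 < st) (h : b ≤ a) :
    PySem.List.pyRange a b st = [] := by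
  rw [PySem.List.pyRange_of_pos a b hst, if_neg (by omega)]
  simp

theorem pvRange_cons (a b st : Int) (hst : 0 < st) (h : a < b) :
    PySem.List.pyRange a b st = a :: PySem.List.pyRange (a + st) b st := by
  rw [PySem.List.pyRange_of_pos a b hst, PySem.List.pyRange_of_pos (a + st) b hst]
  have hc : ((b - a + st - 1) / st).toNat = ((if a + st < b then ((b - (a + st) + st - 1) / st).toNat else 0)) + 1 := by
    by_cases h2 : a + st < b
    · rw [if_pos h2]
      have he : b - a + st - 1 = (b - (a + st) + st - 1) + 1 * st := by ring
      rw [he, Int.add_mul_ediv_right _ _ (by omega)]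
      have : 0 ≤ (b - (a + st) + st - 1) / st := Int.ediv_nonneg (by omega) (by omega)
      omega
    · rw [if_neg h2]
      have hb : b - a + st - 1 < 2 * st := by omega
      have h1' : 1 ≤ (b - a + st - 1) / st := Int.le_ediv_iff_mul_le (by omega) |>.mpr (by omega)
      have h2' : (b - a + st - 1) / st < 2 := Int.ediv_lt_iff_lt_mul (by omega) |>.mpr (by omega)
      omega
  rw [if_pos h, hc, List.range_succ_eq_map]
  simp only [List.map_cons, List.map_map, Nat.cast_zero, mul_zero, add_zero]
  congr 1
  apply List.map_congr_left
  intro k _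
  simp only [Function.comp_apply, Nat.succ_eq_add_one]
  push_cast
  ring

theorem pvRange_translate (a b st c : Int) (hst : 0 < st) :
    PySem.List.pyRange (a + c) (b + c) st = (PySem.List.pyRange a b st).map (· + c) := by
  rw [PySem.List.pyRange_of_pos _ _ hst, PySem.List.pyRange_of_pos _ _ hst, List.map_map]
  have hd : b + c - (a + c) = b - a := by ring
  by_cases hab : a < b
  · rw [if_pos (by omega), if_pos hab, hd]
    apply List.map_congr_left
    intro k _
    simp only [Function.comp_apply]; ring
  · rw [if_neg (by omega), if_neg hab]
    simp

-- main sum identity on a descending-sorted list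
theorem pvMain (m : Int) (hm : 0 < m) :
    ∀ (n : Nat) (s : List Int), s.length = n → s.Pairwise (fun a b => b ≤ a) →
      ((pvChunks m.toNat s).map (fun j => (PySem.List.min? j (fun x => x)).getD 0 * m)).sum
        = m * ((PySem.List.pyRange (m - 1) (s.length : Int) m).map (fun i => PySem.List.pyGetD s i 0)).sum := by
  intro n
  induction n using Nat.strong_induction_on with
  | _ n ih =>
    intro s hn hp
    by_cases hlen : m ≤ (s.length : Int)
    · -- one complete chunk plus the rest
      have hmn : 0 < m.toNat ∧ m.toNat ≤ s.length := by omega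
      rw [pvChunks, dif_pos hmn]
      -- the minimum of the first chunk is s[m-1]
      have htne : s.take m.toNat ≠ [] := by
        simp only [ne_eq, List.take_eq_nil_iff, not_or]
        exact ⟨by omega, by intro h'; subst h'; simp at hlen; omega⟩
      have hmin : (PySem.List.min? (s.take m.toNat) (fun x => x)).getD 0 = s[m.toNat - 1]'(by omega) := by
        rw [pvMin_desc _ htne (by exact hp.sublist (List.take_sublist _ _)), List.getLast_eq_getElem]
        rw [List.getElem_take]
        congr 1
        simp; omega
      -- unfold the range once and translate the tail
      have hr : PySem.List.pyRange (m - 1) (s.length : Int) m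
          = (m - 1) :: (PySem.List.pyRange (m - 1) ((s.length : Int) - m) m).map (· + m) := by
        rw [pvRange_cons _ _ _ hm (by omega)]
        congr 1
        have := pvRange_translate (m - 1) ((s.length : Int) - m) m m hm
        rw [show m - 1 + m = m + (m-1) by ring, show (s.length : Int) - m + m = (s.length : Int) by ring] at this
        rw [show m + (m - 1) = m - 1 + m by ring] at this
        exact this
      rw [hr]
      simp only [List.map_cons, List.map_map, List.sum_cons]
      -- head index value
      have hget : PySem.List.pyGetD s (m - 1) 0 = s[m.toNat - 1]'(by omega) := by
        rw [PySem.List.pyGetD_eq_getElem s 0 (by omega) (by omega)]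
        congr 1; omega
      -- shifted tail indices read from the dropped list
      have hdroplen : ((s.drop m.toNat).length : Int) = (s.length : Int) - m := by
        simp; omega
      have hshift : (PySem.List.pyRange (m - 1) ((s.length : Int) - m) m).map ((fun i => PySem.List.pyGetD s i 0) ∘ (· + m))
          = (PySem.List.pyRange (m - 1) (((s.drop m.toNat).length : Int)) m).map (fun i => PySem.List.pyGetD (s.drop m.toNat) i 0) := by
        rw [hdroplen]
        apply List.map_congr_left
        intro i hi
        have hmem := (PySem.List.mem_pyRange_iff_of_pos hm i).mp hi
        simp only [Function.comp_apply]
        have h0 : (0:Int) ≤ i := by omega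
        by_cases hin : i < (s.length : Int) - m
        · rw [PySem.List.pyGetD_eq_getElem s 0 (by omega) (by omega),
              PySem.List.pyGetD_eq_getElem (s.drop m.toNat) 0 h0 (by omega)]
          rw [List.getElem_drop]
          congr 1; omega
        · omega
      rw [hshift]
      have hdp : (s.drop m.toNat).Pairwise (fun a b => b ≤ a) :=
        hp.sublist (List.drop_sublist _ _)
      have hrec := ih (s.drop m.toNat).length (by simp; omega) (s.drop m.toNat) rfl hdp
      rw [hrec]
      rw [hget, hmin]
      ring
    · -- fewer than m scores: no complete box, empty range
      rw [pvChunks, dif_neg (by omega), pvRange_empty _ _ _ hm (by omega)]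
      simp

-- ===== VERDICT (by name: the statement is the Claim_ definition above) =====
theorem solution_spec : Claim_equal_solution := by
  intro k m score _ hpre
  unfold Spec_solution solution solution_alt
  simp only []
  set s := PySem.List.sorted score (fun x => x) true with hs
  rcases lt_or_gt_of_ne hpre with hneg | hpos
  · -- m < 0: no box is ever complete, and the range is empty
    have hfold : ∀ (l : List Int) (box : List (List Int)) (st : List Int),
        l.foldl (pvStep m) (box, st) = (box, st ++ l) := by
      intro l
      induction l with
      | nil => simp
      | cons x rest ih =>
        intro box st
        simp only [List.foldl_cons]
        rw [show pvStep m (box, st) x = (box, st ++ [x]) by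
          simp [pvStep]; omega]
        rw [ih]; simp
    rw [hfold]
    have hrange : PySem.List.pyRange (m - 1) (s.length : Int) m = [] := by
      unfold PySem.List.pyRange
      rw [if_neg (by omega)]
      simp only
      rw [if_neg (by omega), if_neg (by omega)]
      simp
    simp only [List.nil_append]
    rw [if_neg (by omega : ¬((s.length : Int) = m)), hrange]
    simp
  · -- m > 0: both sides equal the chunk-minimum sum
    have hsp : s.Pairwise (fun a b => b ≤ a) :=
      PySem.List.sorted_pairwise_rev score (fun x => x)
    have hfold :
        (let r := s.foldl (pvStep m) ([], [])
         if (r.2.length : Int) = m then r.1 ++ [r.2] else r.1) = pvChunks m.toNat s := by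
      cases s with
      | nil =>
        simp only [List.foldl_nil]
        rw [if_neg (by simp; omega), pvChunks_nil]
      | cons x rest =>
        simp only [List.foldl_cons]
        rw [show pvStep m ([], []) x = ([], [x]) by simp [pvStep]; omega]
        have := pvFold_inv m hpos rest [] [x] (by simp) (by simpa using hpos)
        simpa using this
    simp only at hfold
    rw [hfold]
    rw [PySem.List.foldl_add, PySem.List.foldl_add]
    have := pvMain m hpos s.length s rfl hsp
    simpa using this
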